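-- pv_equiv track=rewrite | github.com/narendrasinghdangi/leetcode-problems | 2578-split-with-minimum-sum/2578-split-with-minimum-sum.py | splitNum
-- ===== SOURCE A (Python) =====
-- def splitNum(num: int) -> int:
--     nums=sorted(str(num))
--     num1=""
--     num2=""
--     for i in range(len(nums)):
--         if i%2==0:
--             num1=num1+nums[i]
--         else:
--             num2=num2+nums[i]
--     return int(num1)+int(num2)
-- ===== SOURCE B (Python) =====
-- def splitNum(num: int) -> int:
--     counts = {}
--     for ch in str(num):
--         counts[ch] = counts.get(ch, 0) + 1
--     num1 = ""
--     num2 = ""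
--     i = 0
--     for ch in sorted(counts):
--         for _ in range(counts[ch]):
--             if i % 2 == 0:
--                 num1 += ch
--             else:
--                 num2 += ch
--             i += 1
--     return int(num1) + int(num2)
-- ===== Notes on version B (the rewrite author's own statement) =====
-- stated objective: alternative
-- what changed: Replaces sorting the whole decimal string and an index loop by a counting pass: a dict counts each character of str(num) once, then the distinct characters are walked in sorted order emitting each one count-many times with a running parity counter; Pre_ excludes single-digit inputs (|num| < 10), on which A raises ValueError from int('') and B raises identically.
import Mathlib
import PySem

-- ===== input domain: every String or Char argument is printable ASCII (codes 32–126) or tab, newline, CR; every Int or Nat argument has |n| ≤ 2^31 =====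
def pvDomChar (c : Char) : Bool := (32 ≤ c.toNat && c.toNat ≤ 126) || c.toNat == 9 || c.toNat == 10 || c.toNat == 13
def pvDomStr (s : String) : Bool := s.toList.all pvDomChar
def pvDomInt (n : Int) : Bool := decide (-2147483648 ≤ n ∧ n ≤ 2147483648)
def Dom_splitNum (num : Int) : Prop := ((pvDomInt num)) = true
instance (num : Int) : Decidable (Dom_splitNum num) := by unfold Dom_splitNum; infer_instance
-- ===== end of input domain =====

-- B counts the characters of str(num) in a dict and emits the distinct characters in sorted
-- order, count-many times each, alternating by a running counter (objective: alternative).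

-- ===== PORT A =====
def splitNum (num : Int) : Int :=
  let nums := PySem.List.sorted (PySem.Int.toStr num).toList (fun c => c)
  let r := (PySem.List.pyRange 0 (PySem.List.len nums) 1).foldl
      (fun (p : List Char × List Char) i =>
        if PySem.Int.mod i 2 == 0 then (p.1 ++ [PySem.List.pyGetD nums i ' '], p.2)
        else (p.1, p.2 ++ [PySem.List.pyGetD nums i ' ']))
      ([], [])
  (PySem.Int.ofChars? r.1).getD 0 + (PySem.Int.ofChars? r.2).getD 0

-- ===== PORT B =====
def splitNum_alt (num : Int) : Int :=
  let counts := (PySem.Int.toChars num).foldl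
      (fun (d : PySem.Dict Char Int) ch => d.insert ch (d.getD ch 0 + 1)) PySem.Dict.empty
  let st := (PySem.List.sorted counts.keys (fun c => c)).foldl
      (fun (st : List Char × List Char × Int) ch =>
        -- counts[ch]: ch is a key of counts here, so getD is exact
        (PySem.List.pyRange 0 (counts.getD ch 0) 1).foldl
          (fun (st2 : List Char × List Char × Int) _ =>
            if PySem.Int.mod st2.2.2 2 = 0 then (st2.1 ++ [ch], st2.2.1, st2.2.2 + 1)
            else (st2.1, st2.2.1 ++ [ch], st2.2.2 + 1))
          st)
      ([], [], (0 : Int))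
  (PySem.Int.ofChars? st.1).getD 0 + (PySem.Int.ofChars? st.2.1).getD 0

-- ===== PRECONDITION & SPEC =====
-- Pre_ excludes exactly the single-digit inputs (|num| < 10): there the second string stays
-- empty and Python A raises ValueError (int('') or int('-')); B raises the same way.
def Pre_splitNum (num : Int) : Prop := num ≤ -10 ∨ 10 ≤ num
instance (num : Int) : Decidable (Pre_splitNum num) := by unfold Pre_splitNum; infer_instance
def pvWitness_splitNum : Int := 4325
def Spec_splitNum (num : Int) (out : Int) : Prop := out = splitNum_alt num
instance (num : Int) (out : Int) : Decidable (Spec_splitNum num out) := by unfold Spec_splitNum; infer_instance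

-- ===== CLAIM (what is proved, stated in full; the proofs are below) =====
def Claim_equal_splitNum : Prop := ∀ (num : Int), Dom_splitNum num → Pre_splitNum num → Spec_splitNum num (splitNum num)

-- ===== LEMMAS AND PROOFS =====

-- the even-index / odd-index characters of a list
mutual
def pvEvens : List Char → List Char
  | [] => []
  | x :: t => x :: pvOdds t
def pvOdds : List Char → List Char
  | [] => []
  | _ :: t => pvEvens t
end

-- a recursor skeleton for two-at-a-time induction
def pvPairRec : List Char → Unit
  | [] => ()
  | [_] => ()
  | _ :: _ :: t => pvPairRec t

def pvStepIdx (nums : List Char) (p : List Char × List Char) (k : Nat) : List Char × List Char :=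
  if k % 2 = 0 then (p.1 ++ [nums.getD k ' '], p.2) else (p.1, p.2 ++ [nums.getD k ' '])

-- B's emission step: running counter parity chooses the side
def pvStep (st : List Char × List Char × Int) (c : Char) : List Char × List Char × Int :=
  if PySem.Int.mod st.2.2 2 = 0 then (st.1 ++ [c], st.2.1, st.2.2 + 1)
  else (st.1, st.2.1 ++ [c], st.2.2 + 1)

lemma pvEvens_two (x y : Char) (t : List Char) : pvEvens (x :: y :: t) = x :: pvEvens t := rfl
lemma pvOdds_two (x y : Char) (t : List Char) : pvOdds (x :: y :: t) = y :: pvOdds t := rfl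

-- A's index loop is the even/odd split of the list
lemma pvStepIdx_shift (x y : Char) (t : List Char) (p : List Char × List Char) (k : Nat) :
    pvStepIdx (x :: y :: t) p (k + 2) = pvStepIdx t p k := by
  simp [pvStepIdx, Nat.add_mod_right]

lemma pvFoldA (l : List Char) : ∀ n1 n2 : List Char,
    (List.range l.length).foldl (pvStepIdx l) (n1, n2) = (n1 ++ pvEvens l, n2 ++ pvOdds l) := by
  induction l using pvPairRec.induct with
  | case1 => simp [pvEvens, pvOdds]
  | case2 x =>
      intro n1 n2
      simp [List.range, pvStepIdx, pvEvens, pvOdds, List.range.loop]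
  | case3 x y t ih =>
      intro n1 n2
      have hr : List.range (x :: y :: t).length = 0 :: 1 :: (List.range t.length).map (fun k => k + 2) := by
        show List.range (t.length + 1 + 1) = _
        rw [List.range_succ_eq_map, List.range_succ_eq_map, List.map_cons, List.map_map]
        rfl
      rw [hr]
      simp only [List.foldl_cons]
      have h0 : pvStepIdx (x :: y :: t) (n1, n2) 0 = (n1 ++ [x], n2) := by
        simp [pvStepIdx]
      have h1 : pvStepIdx (x :: y :: t) (n1 ++ [x], n2) 1 = (n1 ++ [x], n2 ++ [y]) := by
        simp [pvStepIdx]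
      rw [h0, h1, List.foldl_map]
      have hcg : List.foldl (fun p k => pvStepIdx (x :: y :: t) p (k + 2)) (n1 ++ [x], n2 ++ [y]) (List.range t.length)
          = List.foldl (pvStepIdx t) (n1 ++ [x], n2 ++ [y]) (List.range t.length) := by
        apply PySem.List.foldl_congr_mem
        intro acc k _
        exact pvStepIdx_shift x y t acc k
      rw [hcg, ih]
      simp [pvEvens_two, pvOdds_two]

-- parity of the running counter flips at each step
lemma pvMod_flip (i : Int) : (PySem.Int.mod (i + 1) 2 = 0) ↔ ¬ (PySem.Int.mod i 2 = 0) := by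
  show (Int.fmod (i + 1) 2 = 0) ↔ ¬ (Int.fmod i 2 = 0)
  rw [Int.fmod_eq_emod, Int.fmod_eq_emod]
  simp
  omega

-- the counter fold is the even/odd split
lemma pvEmit (l : List Char) : ∀ (n1 n2 : List Char) (i : Int),
    l.foldl pvStep (n1, n2, i) =
      (n1 ++ (if PySem.Int.mod i 2 = 0 then pvEvens l else pvOdds l),
       n2 ++ (if PySem.Int.mod i 2 = 0 then pvOdds l else pvEvens l),
       i + l.length) := by
  induction l with
  | nil => intro n1 n2 i; simp [pvEvens, pvOdds]
  | cons x t ih =>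
      intro n1 n2 i
      by_cases h : PySem.Int.mod i 2 = 0
      · have h' : ¬ PySem.Int.mod (i + 1) 2 = 0 := by rw [pvMod_flip]; exact not_not_intro h
        simp only [List.foldl_cons, pvStep, if_pos h, ih, if_neg h', pvEvens, pvOdds]
        simp
        omega
      · have h' : PySem.Int.mod (i + 1) 2 = 0 := (pvMod_flip i).mpr h
        simp only [List.foldl_cons, pvStep, if_neg h, ih, if_pos h', pvEvens, pvOdds]
        simp
        omega

-- folding while ignoring the element is function iteration
lemma pvFoldl_const {α β : Type} (l : List α) (g : β → β) (s : β) :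
    l.foldl (fun st _ => g st) s = g^[l.length] s := by
  induction l generalizing s with
  | nil => rfl
  | cons x t ih => simp [List.foldl_cons, ih, Function.iterate_succ_apply]

lemma pvFoldl_replicate {β : Type} (n : Nat) (c : Char) (f : β → Char → β) (s : β) :
    (List.replicate n c).foldl f s = (fun st => f st c)^[n] s := by
  induction n generalizing s with
  | zero => rfl
  | succ m ih => simp [List.replicate_succ, List.foldl_cons, ih, Function.iterate_succ_apply]

-- folding bucket by bucket is folding over the concatenated buckets
lemma pvOuterFold (al : List Char) (cnt : Char → Nat) (init : List Char × List Char × Int) :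
    al.foldl (fun st c => (List.replicate (cnt c) c).foldl pvStep st) init
      = (al.flatMap fun c => List.replicate (cnt c) c).foldl pvStep init := by
  induction al generalizing init with
  | nil => rfl
  | cons c t ih => simp [List.flatMap_cons, List.foldl_append, ih]

-- counting characters of the alphabet reproduces the multiset
lemma pvFlat_count (al : List Char) (g : List Char) (hnd : al.Nodup) (a : Char) :
    (al.flatMap fun c => List.replicate (List.count c g) c).count a
      = if a ∈ al then List.count a g else 0 := by
  induction al with
  | nil => simp
  | cons c rest ih =>
      simp only [List.flatMap_cons, List.count_append, List.count_replicate]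
      rcases List.nodup_cons.mp hnd with ⟨hc, hrest⟩
      by_cases h : c = a
      · subst h
        simp [ih hrest, hc]
      · simp [ih hrest, Ne.symm h, h]

lemma pvFlat_perm (al : List Char) (g : List Char) (hnd : al.Nodup)
    (hg : ∀ c ∈ g, c ∈ al) :
    (al.flatMap fun c => List.replicate (List.count c g) c).Perm g := by
  rw [List.perm_iff_count]
  intro a
  rw [pvFlat_count al g hnd a]
  by_cases h : a ∈ al
  · simp [h]
  · simp [h, List.count_eq_zero.mpr (fun hm => h (hg a hm))]

lemma pvFlat_pairwise (al : List Char) (g : List Char) (hal : al.Pairwise (· ≤ ·)) :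
    (al.flatMap fun c => List.replicate (List.count c g) c).Pairwise (· ≤ ·) := by
  induction al with
  | nil => simp
  | cons c rest ih =>
      simp only [List.flatMap_cons]
      rw [List.pairwise_append]
      rcases List.pairwise_cons.mp hal with ⟨hcr, hrest⟩
      refine ⟨List.pairwise_replicate.mpr (Or.inr le_rfl), ih hrest, ?_⟩
      intro a ha b hb
      rw [List.eq_of_mem_replicate ha]
      rcases List.mem_flatMap.mp hb with ⟨c', hc', hb'⟩
      rw [List.eq_of_mem_replicate hb']
      exact hcr c' hc'

-- reducing port A to the even/odd split of the sorted character list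
lemma pvA_eval (num : Int) :
    splitNum num =
      (PySem.Int.ofChars? (pvEvens (PySem.List.sorted (PySem.Int.toChars num) (fun c => c)))).getD 0 +
      (PySem.Int.ofChars? (pvOdds (PySem.List.sorted (PySem.Int.toChars num) (fun c => c)))).getD 0 := by
  unfold splitNum
  simp only [PySem.Int.toList_toStr, PySem.List.len_eq]
  rw [PySem.List.pyRange_one, List.foldl_map]
  have hlen : (((PySem.List.sorted (PySem.Int.toChars num) (fun c => c)).length : Int) - 0).toNat
      = (PySem.List.sorted (PySem.Int.toChars num) (fun c => c)).length := by omega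
  rw [hlen]
  have hbody : List.foldl
      (fun (p : List Char × List Char) (k : Nat) =>
        if PySem.Int.mod (0 + (k : Int)) 2 == 0 then
          (p.1 ++ [PySem.List.pyGetD (PySem.List.sorted (PySem.Int.toChars num) (fun c => c)) (0 + (k : Int)) ' '], p.2)
        else
          (p.1, p.2 ++ [PySem.List.pyGetD (PySem.List.sorted (PySem.Int.toChars num) (fun c => c)) (0 + (k : Int)) ' ']))
      ([], []) (List.range (PySem.List.sorted (PySem.Int.toChars num) (fun c => c)).length)
      = List.foldl (pvStepIdx (PySem.List.sorted (PySem.Int.toChars num) (fun c => c)))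
        ([], []) (List.range (PySem.List.sorted (PySem.Int.toChars num) (fun c => c)).length) := by
    apply PySem.List.foldl_congr_mem
    intro acc k _
    have hmod : PySem.Int.mod (0 + (k : Int)) 2 = ((k % 2 : Nat) : Int) := by
      rw [zero_add]
      rw [show PySem.Int.mod (k : Int) 2 = Int.fmod (k : Int) 2 from rfl]
      rw [Int.fmod_eq_emod]
      simp
    have hget : PySem.List.pyGetD (PySem.List.sorted (PySem.Int.toChars num) (fun c => c)) (0 + (k : Int)) ' '
        = (PySem.List.sorted (PySem.Int.toChars num) (fun c => c)).getD k ' ' := by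
      rw [zero_add, PySem.List.pyGetD_of_nonneg _ _ (Int.natCast_nonneg k), Int.toNat_natCast]
    rw [hmod, hget]
    by_cases hk2 : k % 2 = 0
    · simp [hk2, pvStepIdx]
    · have hk1 : k % 2 = 1 := by omega
      simp [hk1, pvStepIdx]
  rw [hbody, pvFoldA]
  simp

-- reducing port B to the counter fold over the concatenated sorted digit buckets
lemma pvB_eval (num : Int) :
    splitNum_alt num =
      (PySem.Int.ofChars?
        (((PySem.List.sorted (PySem.Set.ofList (PySem.Int.toChars num)) (fun c => c)).flatMap
            fun c => List.replicate (List.count c (PySem.Int.toChars num)) c).foldl pvStep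
          ([], [], (0 : Int))).1).getD 0 +
      (PySem.Int.ofChars?
        (((PySem.List.sorted (PySem.Set.ofList (PySem.Int.toChars num)) (fun c => c)).flatMap
            fun c => List.replicate (List.count c (PySem.Int.toChars num)) c).foldl pvStep
          ([], [], (0 : Int))).2.1).getD 0 := by
  unfold splitNum_alt
  dsimp only
  set g := PySem.Int.toChars num with hg
  have hcnt : g.foldl (fun (d : PySem.Dict Char Int) ch => d.insert ch (d.getD ch 0 + 1)) PySem.Dict.empty
      = PySem.Dict.counter g := PySem.Dict.foldl_insert_getD_add_one_eq_counter g
  rw [hcnt, PySem.Dict.keys_counter]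
  set al := PySem.List.sorted (PySem.Set.ofList g) (fun c => c) with hal
  have hst : al.foldl
      (fun (st : List Char × List Char × Int) ch =>
        (PySem.List.pyRange 0 ((PySem.Dict.counter g).getD ch 0) 1).foldl
          (fun (st2 : List Char × List Char × Int) _ =>
            if PySem.Int.mod st2.2.2 2 = 0 then (st2.1 ++ [ch], st2.2.1, st2.2.2 + 1)
            else (st2.1, st2.2.1 ++ [ch], st2.2.2 + 1))
          st)
      ([], [], (0 : Int))
      = (al.flatMap fun c => List.replicate (List.count c g) c).foldl pvStep ([], [], (0 : Int)) := by
    refine Eq.trans (PySem.List.foldl_congr_mem al _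
      (fun st c => (List.replicate (List.count c g) c).foldl pvStep st) ([], [], (0 : Int)) ?_)
      (pvOuterFold al (fun c => List.count c g) _)
    intro acc c _
    rw [PySem.Dict.getD_counter]
    rw [show (fun (st2 : List Char × List Char × Int) (_ : Int) =>
          if PySem.Int.mod st2.2.2 2 = 0 then (st2.1 ++ [c], st2.2.1, st2.2.2 + 1)
          else (st2.1, st2.2.1 ++ [c], st2.2.2 + 1))
        = (fun st2 (_ : Int) => pvStep st2 c) from rfl]
    rw [pvFoldl_const]
    show _ = (List.replicate (List.count c g) c).foldl pvStep acc
    rw [pvFoldl_replicate]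
    congr 1
    rw [PySem.List.length_pyRange_one]
    omega
  rw [hst]

-- ===== VERDICT (by name: the statement is the Claim_ definition above) =====
theorem splitNum_spec : Claim_equal_splitNum := by
  intro num _ _
  unfold Spec_splitNum
  rw [pvA_eval, pvB_eval]
  set g := PySem.Int.toChars num with hg
  set al := PySem.List.sorted (PySem.Set.ofList g) (fun c => c) with hal
  have hnd : al.Nodup :=
    ((PySem.List.sorted_perm (PySem.Set.ofList g) (fun c => c) false).nodup_iff).mpr
      (PySem.Set.nodup_ofList g)
  have hmem : ∀ c ∈ g, c ∈ al := by
    intro c hc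
    rw [hal, PySem.List.mem_sorted]
    exact (PySem.Set.mem_ofList g c).mpr hc
  have hperm := pvFlat_perm al g hnd hmem
  have hpwal : al.Pairwise (· ≤ ·) :=
    (PySem.List.sorted_ofList_pairwise_lt g).imp (fun h => le_of_lt h)
  have hpw := pvFlat_pairwise al g hpwal
  set E := al.flatMap fun c => List.replicate (List.count c g) c with hE
  have hsorted : PySem.List.sorted g (fun c => c) = E :=
    PySem.List.sorted_id_eq_of_perm_of_pairwise g E hperm hpw
  rw [hsorted, pvEmit]
  have h0 : PySem.Int.mod (0 : Int) 2 = 0 := by decide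
  rw [if_pos h0, if_pos h0]
  simp
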